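-- pv_equiv track=rewrite | github.com/Siggywiggy/python_gently_explained | Excercise_9_Chess_Square_Color.py | get_chess_square_color
-- ===== SOURCE A (Python) =====
-- def get_chess_square_color(num1, num2):
--     if num1 not in range(0, 8) or num2 not in range(0, 8):
--         return ''
--     else:
--         chess_board = [[] for i in range(0, 8)]
--         for i in range(0, len(chess_board)):
--             if i % 2 == 0:
--                 for j in range(0, len(chess_board)):
--                     if j % 2 == 0:
--                         chess_board[i].append('white')
--                     elif j % 2 != 0:
--                         chess_board[i].append('black')
--
--             elif i % 2 != 0:
--                 for j in range(len(chess_board)):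
--                     if j % 2 == 0:
--                         chess_board[i].append('black')
--                     elif j % 2 != 0:
--                         chess_board[i].append('white')
--
--     return chess_board[num1][num2]
-- ===== SOURCE B (Python) =====
-- def get_chess_square_color(num1, num2):
--     if num1 not in range(0, 8) or num2 not in range(0, 8):
--         return ''
--     return ['white', 'black'][(num1 + num2) % 2]
-- ===== Notes on version B (the rewrite author's own statement) =====
-- stated objective: simpler
-- what changed: Replaced the construction of the whole 8x8 board with a closed-form parity lookup ['white','black'][(num1+num2)%2] after the same range guard.
import Mathlib
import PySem

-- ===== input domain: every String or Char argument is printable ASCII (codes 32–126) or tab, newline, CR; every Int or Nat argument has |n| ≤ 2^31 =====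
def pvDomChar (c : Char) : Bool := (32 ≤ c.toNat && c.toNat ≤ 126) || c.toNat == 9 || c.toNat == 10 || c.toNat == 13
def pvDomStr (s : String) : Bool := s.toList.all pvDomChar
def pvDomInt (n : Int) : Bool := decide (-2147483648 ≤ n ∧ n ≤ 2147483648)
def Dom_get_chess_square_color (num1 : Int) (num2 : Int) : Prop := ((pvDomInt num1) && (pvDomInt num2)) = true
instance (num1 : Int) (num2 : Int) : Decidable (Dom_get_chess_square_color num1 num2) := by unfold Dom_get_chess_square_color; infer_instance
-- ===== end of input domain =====

-- B replaces A's full 8x8 board construction with a closed-form parity lookup (simpler, constant work).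

-- ===== PORT A =====
-- builds the 8x8 board exactly as A does (rows mutated in place → List.set), then indexes it
def get_chess_square_color (num1 : Int) (num2 : Int) : String :=
  if num1 < 0 ∨ 8 ≤ num1 ∨ num2 < 0 ∨ 8 ≤ num2 then ""
  else
    let chess_board : List (List String) :=
      (PySem.List.pyRange 0 8 1).map (fun _ => ([] : List String))
    let chess_board :=
      (PySem.List.pyRange 0 (chess_board.length) 1).foldl
        (fun (b : List (List String)) i =>
          if PySem.Int.mod i 2 == 0 then
            b.set i.toNat
              ((PySem.List.pyRange 0 (b.length) 1).foldl
                (fun row j =>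
                  if PySem.Int.mod j 2 == 0 then row ++ ["white"]
                  else if PySem.Int.mod j 2 != 0 then row ++ ["black"] else row)
                (b.getD i.toNat []))
          else if PySem.Int.mod i 2 != 0 then
            b.set i.toNat
              ((PySem.List.pyRange 0 (b.length) 1).foldl
                (fun row j =>
                  if PySem.Int.mod j 2 == 0 then row ++ ["black"]
                  else if PySem.Int.mod j 2 != 0 then row ++ ["white"] else row)
                (b.getD i.toNat []))
          else b)
        chess_board
    ((PySem.List.pyGet? chess_board num1).bind
      (fun row => PySem.List.pyGet? row num2)).getD ""

-- ===== PORT B =====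
def get_chess_square_color_alt (num1 : Int) (num2 : Int) : String :=
  if num1 < 0 ∨ 8 ≤ num1 ∨ num2 < 0 ∨ 8 ≤ num2 then ""
  else (PySem.List.pyGet? ["white", "black"] (PySem.Int.mod (num1 + num2) 2)).getD ""

-- ===== PRECONDITION & SPEC =====
def Spec_get_chess_square_color (num1 : Int) (num2 : Int) (out : String) : Prop := out = get_chess_square_color_alt num1 num2
instance (num1 : Int) (num2 : Int) (out : String) : Decidable (Spec_get_chess_square_color num1 num2 out) := by unfold Spec_get_chess_square_color; infer_instance

-- ===== CLAIM (what is proved, stated in full; the proofs are below) =====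
def Claim_equal_get_chess_square_color : Prop := ∀ (num1 : Int) (num2 : Int), Dom_get_chess_square_color num1 num2 → Spec_get_chess_square_color num1 num2 (get_chess_square_color num1 num2)

-- ===== LEMMAS AND PROOFS =====

-- ===== VERDICT (by name: the statement is the Claim_ definition above) =====
theorem get_chess_square_color_spec : Claim_equal_get_chess_square_color := by
  intro num1 num2 _
  unfold Spec_get_chess_square_color
  by_cases h : num1 < 0 ∨ 8 ≤ num1 ∨ num2 < 0 ∨ 8 ≤ num2
  · simp [get_chess_square_color, get_chess_square_color_alt, h]
  · push Not at h
    obtain ⟨h1, h2, h3, h4⟩ := h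
    interval_cases num1 <;> interval_cases num2 <;> decide
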